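-- pv_equiv track=rewrite | github.com/RuRuo0/Datasets | core/aux_tools/parse.py | _parse_fv_check_format
-- ===== SOURCE A (Python) =====
-- def _parse_fv_check_format(fv_check_format):
--     results = []
--     for item in fv_check_format:
--         checked = []
--         result = []
--         for i in item.replace(",", ""):
--             if i not in checked:
--                 checked.append(i)
--             result.append(str(checked.index(i)))
--         results.append("".join(result))
--     return results
-- ===== SOURCE B (Python) =====
-- def _parse_fv_check_format(fv_check_format):
--     results = []
--     for item in fv_check_format:
--         s = item.replace(",", "")
--         results.append("".join(str(len(set(s[:s.index(c)]))) for c in s))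
--     return results
-- ===== Notes on version B (the rewrite author's own statement) =====
-- stated objective: alternative
-- what changed: A maintains a growing 'checked' list and answers each character with checked.index; B keeps no state at all: each character's code is the closed form len(set(s[:s.index(c)])) (number of distinct characters strictly before its first occurrence), computed independently per position.
import Mathlib
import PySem

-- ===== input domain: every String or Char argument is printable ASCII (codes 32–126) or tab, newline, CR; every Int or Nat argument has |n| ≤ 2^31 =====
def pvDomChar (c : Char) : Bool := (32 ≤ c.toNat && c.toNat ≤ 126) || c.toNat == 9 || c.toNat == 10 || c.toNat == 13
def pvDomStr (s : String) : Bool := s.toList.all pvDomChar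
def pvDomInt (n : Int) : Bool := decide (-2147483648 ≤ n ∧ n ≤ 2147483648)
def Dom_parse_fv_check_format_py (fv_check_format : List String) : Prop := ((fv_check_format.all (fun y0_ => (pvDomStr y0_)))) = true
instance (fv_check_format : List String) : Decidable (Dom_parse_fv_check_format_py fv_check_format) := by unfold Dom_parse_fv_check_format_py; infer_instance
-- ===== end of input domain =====

-- B keeps no running state: each character's code is the stateless closed form
-- len(set(s[:s.index(c)])); same return values as A.

-- ===== PORT A =====
-- literal port: inner loop keeps (checked, result); '.index' always succeeds here (the char was just ensured present), so index?.getD 0 is exact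
def parse_fv_check_format_py (fv_check_format : List String) : List String :=
  fv_check_format.foldl (fun results item =>
    let st := (PySem.Str.replace item "," "").toList.foldl
      (fun (st : List Char × List String) i =>
        let checked := if st.1.contains i then st.1 else st.1 ++ [i]
        (checked, st.2 ++ [PySem.Int.toStr (((PySem.List.index? checked i).getD 0 : Int))]))
      ([], [])
    results ++ [PySem.Str.join "" st.2]) []

-- ===== PORT B =====
-- str(len(set(s[:s.index(c)]))); 's.index(c)' always succeeds (c is drawn from s), so index?.getD 0 is exact
def pvCode (s : List Char) (c : Char) : String :=
  PySem.Int.toStr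
    (((PySem.Set.ofList
        (PySem.List.slice s none (some (((PySem.List.index? s c).getD 0 : Nat) : Int)))).length : Int))

def pvItemB (item : String) : String :=
  let s := (PySem.Str.replace item "," "").toList
  PySem.Str.join "" (s.map (fun c => pvCode s c))

def parse_fv_check_format_py_alt (fv_check_format : List String) : List String :=
  fv_check_format.foldl (fun results item => results ++ [pvItemB item]) []

-- ===== PRECONDITION & SPEC =====
def Spec_parse_fv_check_format_py (fv_check_format : List String) (out : List String) : Prop := out = parse_fv_check_format_py_alt fv_check_format
instance (fv_check_format : List String) (out : List String) : Decidable (Spec_parse_fv_check_format_py fv_check_format out) := by unfold Spec_parse_fv_check_format_py; infer_instance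

-- ===== CLAIM (what is proved, stated in full; the proofs are below) =====
def Claim_equal_parse_fv_check_format_py : Prop := ∀ (fv_check_format : List String), Dom_parse_fv_check_format_py fv_check_format → Spec_parse_fv_check_format_py fv_check_format (parse_fv_check_format_py fv_check_format)

-- ===== LEMMAS AND PROOFS =====

-- a first-occurrence index is unchanged by later set updates
theorem pv_index?_update (t : List Char) (ch : List Char) (c : Char) (hc : c ∈ ch) :
    PySem.List.index? (PySem.Set.update ch t) c = PySem.List.index? ch c := by
  induction t generalizing ch with
  | nil => rfl
  | cons a t ih =>
    have hadd : c ∈ PySem.Set.add ch a := by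
      unfold PySem.Set.add; split <;> simp [hc]
    have h1 : PySem.List.index? (PySem.Set.add ch a) c = PySem.List.index? ch c := by
      unfold PySem.Set.add; split
      · rfl
      · exact PySem.List.index?_append_of_mem _ hc
    calc PySem.List.index? (PySem.Set.update ch (a :: t)) c
        = PySem.List.index? (PySem.Set.update (PySem.Set.add ch a) t) c := rfl
      _ = PySem.List.index? (PySem.Set.add ch a) c := ih _ hadd
      _ = PySem.List.index? ch c := h1

-- characterization of A's inner loop
theorem pv_inner (cs : List Char) (ch : List Char) (res : List String) :
    cs.foldl (fun (st : List Char × List String) i =>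
        let checked := if st.1.contains i then st.1 else st.1 ++ [i]
        (checked, st.2 ++ [PySem.Int.toStr (((PySem.List.index? checked i).getD 0 : Int))]))
      (ch, res)
    = (PySem.Set.update ch cs,
       res ++ cs.map (fun c => PySem.Int.toStr
         (((PySem.List.index? (PySem.Set.update ch cs) c).getD 0 : Int)))) := by
  induction cs generalizing ch res with
  | nil => simp [PySem.Set.update]
  | cons c t ih =>
    have hstep : (if ch.contains c then ch else ch ++ [c]) = PySem.Set.add ch c := by
      unfold PySem.Set.add PySem.Set.contains; rfl
    have hmem : c ∈ PySem.Set.add ch c := by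
      unfold PySem.Set.add; split
      · exact List.contains_iff_mem.mp (by assumption)
      · simp
    have hupd : PySem.Set.update ch (c :: t) = PySem.Set.update (PySem.Set.add ch c) t := rfl
    simp only [List.foldl_cons, hstep]
    rw [ih]
    refine Prod.ext (by rw [hupd]) ?_
    simp only [hupd, List.map_cons, List.append_assoc, List.singleton_append]
    rw [pv_index?_update t _ c hmem]

-- the first-occurrence index in the deduplicated list equals the number of distinct
-- characters strictly before the character's first occurrence (generalized over the seed)
theorem pv_G (s : List Char) (ch : List Char) (c : Char) (hch : c ∉ ch) (hc : c ∈ s) :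
    (PySem.List.index? (PySem.Set.update ch s) c).getD 0
      = (PySem.Set.update ch (s.take ((PySem.List.index? s c).getD 0))).length := by
  induction s generalizing ch with
  | nil => cases hc
  | cons x t ih =>
    by_cases hx : x = c
    · subst hx
      rw [PySem.List.index?_cons_self]
      have hadd : PySem.Set.add ch x = ch ++ [x] := by
        unfold PySem.Set.add PySem.Set.contains
        simp [hch]
      have hmem : x ∈ PySem.Set.add ch x := by rw [hadd]; simp
      have : PySem.Set.update ch (x :: t) = PySem.Set.update (PySem.Set.add ch x) t := rfl
      rw [this, pv_index?_update t _ x hmem, hadd,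
        PySem.List.index?_append_singleton_self ch x hch]
      simp [PySem.Set.update]
    · have hct : c ∈ t := by
        rcases List.mem_cons.mp hc with h | h
        · exact absurd h.symm hx
        · exact h
      rw [PySem.List.index?_cons_of_ne _ hx]
      cases hk : PySem.List.index? t c with
      | none => exact absurd ((PySem.List.index?_eq_none_iff t c).mp hk) (by simp [hct])
      | some k =>
        have hnotadd : c ∉ PySem.Set.add ch x := by
          unfold PySem.Set.add
          split
          · exact hch
          · intro hm
            rcases List.mem_append.mp hm with h | h
            · exact hch h
            · exact hx (List.mem_singleton.mp h).symm
        have h1 : PySem.Set.update ch (x :: t) = PySem.Set.update (PySem.Set.add ch x) t := rfl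
        have h2 : PySem.Set.update ch ((x :: t).take (k + 1))
            = PySem.Set.update (PySem.Set.add ch x) (t.take k) := by
          simp [List.take_succ_cons, PySem.Set.update]
        simp only [Option.map_some, Option.getD_some, h2]
        rw [h1, ih _ hnotadd hct, hk]
        rfl

-- per-item agreement: A's inner loop produces exactly B's stateless per-character codes
theorem pv_item (item : String) :
    PySem.Str.join ""
      ((((PySem.Str.replace item "," "").toList.foldl
        (fun (st : List Char × List String) i =>
          let checked := if st.1.contains i then st.1 else st.1 ++ [i]
          (checked, st.2 ++ [PySem.Int.toStr (((PySem.List.index? checked i).getD 0 : Int))]))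
        ([], []))).2)
    = pvItemB item := by
  unfold pvItemB
  rw [pv_inner]
  simp only [List.nil_append]
  refine congrArg (PySem.Str.join "") ?_
  apply List.map_congr_left
  intro c hc
  unfold pvCode
  rw [PySem.List.slice_to_natCast]
  have hupd : PySem.Set.ofList ((PySem.Str.replace item "," "").toList.take
      ((PySem.List.index? (PySem.Str.replace item "," "").toList c).getD 0))
      = PySem.Set.update [] ((PySem.Str.replace item "," "").toList.take
      ((PySem.List.index? (PySem.Str.replace item "," "").toList c).getD 0)) := by
    rw [PySem.Set.ofList_eq_foldl]; rfl
  rw [hupd, ← pv_G _ [] c (by simp) hc]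

-- the outer loops: both fold-appends are the map of the common per-item encoding
theorem pv_topA (fv : List String) (acc : List String) :
    fv.foldl (fun results item =>
      let st := (PySem.Str.replace item "," "").toList.foldl
        (fun (st : List Char × List String) i =>
          let checked := if st.1.contains i then st.1 else st.1 ++ [i]
          (checked, st.2 ++ [PySem.Int.toStr (((PySem.List.index? checked i).getD 0 : Int))]))
        ([], [])
      results ++ [PySem.Str.join "" st.2]) acc
    = acc ++ fv.map pvItemB := by
  induction fv generalizing acc with
  | nil => simp
  | cons x t ih =>
    simp only [List.foldl_cons, List.map_cons]
    rw [ih, pv_item x, List.append_assoc, List.singleton_append]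

theorem pv_topB (fv : List String) (acc : List String) :
    fv.foldl (fun results item => results ++ [pvItemB item]) acc = acc ++ fv.map pvItemB := by
  induction fv generalizing acc with
  | nil => simp
  | cons x t ih =>
    simp only [List.foldl_cons, List.map_cons]
    rw [ih, List.append_assoc, List.singleton_append]

-- ===== VERDICT (by name: the statement is the Claim_ definition above) =====
theorem parse_fv_check_format_py_spec : Claim_equal_parse_fv_check_format_py := by
  intro fv _
  unfold Spec_parse_fv_check_format_py parse_fv_check_format_py parse_fv_check_format_py_alt
  rw [pv_topA fv [], pv_topB fv []]
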